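-- pv_equiv track=rewrite | github.com/Davever1005/fundaztic-bulk | apps/home/routes.py | split_rows
-- ===== SOURCE A (Python) =====
-- def split_rows(row):
--     # Split the row by '\n' if any element contains '\n'
--     if any(isinstance(val, str) and '\n' in val for val in row):
--         split_values = [str(val).split('\n') if isinstance(val, str) else [val] for val in row]
--         # Determine the maximum length of sublists in the original data
--         max_length = max(len(sublist) for sublist in split_values)
--         # Fill shorter sublists with empty strings to match the maximum length
--         filled_data = [sublist + [''] * (max_length - len(sublist)) for sublist in split_values]
--         # Use zip to transpose the list and then convert it to a list of lists
--         restructured_data = [list(row) for row in zip(*filled_data)]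
--         return restructured_data
--     else:
--         return [list(row)]
-- ===== SOURCE B (Python) =====
-- def split_rows(row):
--     # Head-peeling loop: no max_length, no padding, no index arithmetic.
--     # Repeatedly emit the first remaining line of every cell ('' once a cell
--     # is exhausted) and drop it, until every cell is exhausted.
--     if any(isinstance(val, str) and '\n' in val for val in row):
--         rest = [val.split('\n') if isinstance(val, str) else [val] for val in row]
--         out = []
--         while any(rest):
--             out.append([r[0] if r else '' for r in rest])
--             rest = [r[1:] for r in rest]
--         return out
--     else:
--         return [list(row)]
-- ===== Notes on version B (the rewrite author's own statement) =====
-- stated objective: alternative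
-- what changed: B replaces A's staged max-length computation, padding pass and zip(*) transpose by a single head-peeling loop that repeatedly emits and drops the first remaining line of every cell (with '' for exhausted cells) until all cells are exhausted; it never computes max_length or pads.
import Mathlib
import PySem

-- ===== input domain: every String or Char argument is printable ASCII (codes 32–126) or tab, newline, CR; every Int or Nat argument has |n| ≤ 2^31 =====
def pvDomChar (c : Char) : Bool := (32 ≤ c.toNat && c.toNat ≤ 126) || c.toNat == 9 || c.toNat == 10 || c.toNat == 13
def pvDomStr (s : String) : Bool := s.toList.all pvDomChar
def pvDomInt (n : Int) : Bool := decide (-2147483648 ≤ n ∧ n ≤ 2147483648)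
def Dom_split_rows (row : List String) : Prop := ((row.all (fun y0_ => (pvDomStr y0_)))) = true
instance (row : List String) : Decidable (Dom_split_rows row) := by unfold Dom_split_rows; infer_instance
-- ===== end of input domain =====

-- B replaces A's max-length/padding/zip(*) pipeline by a head-peeling loop; return values proved equal.

-- val.split('\n'): the separator is nonempty, so Str.split? always returns a value.
def splitNL (val : String) : List String := (PySem.Str.split? val "\n").getD []

-- split_values: row holds only strings, so `isinstance(val, str)` is always true and `str(val) = val`.
-- Both A and B compute split_values by the same comprehension.
def pvSplitVals (row : List String) : List (List String) := row.map (fun val => splitNL val)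

-- ===== PORT A =====
-- max(len(sublist) for sublist in split_values): max over a nonempty list (guaranteed by the guard).
def pvMaxLen (sv : List (List String)) : Nat :=
  (PySem.List.max? (sv.map (fun s => s.length)) (fun x => x)).getD 0

-- zip(*filled): take one element from the head of every list while all are nonempty
-- (zip() with no arguments, and zip once some list is exhausted, yields nothing).
def pyZipStar (ls : List (List String)) : List (List String) :=
  if h : ls ≠ [] ∧ ∀ l ∈ ls, l ≠ [] then
    (ls.map (fun l => l.headD "")) :: pyZipStar (ls.map (fun l => l.tail))
  else []
termination_by (ls.headD []).length
decreasing_by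
  match ls, h with
  | a :: t, ⟨_, h2⟩ =>
    have := List.length_pos_of_ne_nil (h2 a List.mem_cons_self)
    simp only [List.attach_cons, List.map_cons, List.headD_cons, List.map_map, List.length_tail]
    omega

def split_rows (row : List String) : List (List String) :=
  if row.any (fun val => PySem.Str.isIn "\n" val) then
    pyZipStar ((pvSplitVals row).map
      (fun sublist => sublist ++ List.replicate (pvMaxLen (pvSplitVals row) - sublist.length) ""))
  else [row]

-- ===== PORT B =====
-- while any(rest): emit [r[0] if r else '' for r in rest]; rest = [r[1:] for r in rest]
def peelRows (rest : List (List String)) : List (List String) :=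
  if h : ∃ l ∈ rest, l ≠ [] then
    (rest.map (fun r => r.headD "")) :: peelRows (rest.map (fun r => r.tail))
  else []
termination_by (rest.map List.length).sum
decreasing_by
  rw [List.map_attach_eq_pmap, List.map_pmap]
  simp only [List.pmap_eq_map]
  apply List.sum_lt_sum
  · intro r _; simp [List.length_tail]
  · obtain ⟨l, hl, hne⟩ := h
    exact ⟨l, hl, by have := List.length_pos_of_ne_nil hne; simp [List.length_tail]; omega⟩

def split_rows_alt (row : List String) : List (List String) :=
  if row.any (fun val => PySem.Str.isIn "\n" val) then
    peelRows (pvSplitVals row)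
  else [row]

-- ===== PRECONDITION & SPEC =====
def Spec_split_rows (row : List String) (out : List (List String)) : Prop := out = split_rows_alt row
instance (row : List String) (out : List (List String)) : Decidable (Spec_split_rows row out) := by unfold Spec_split_rows; infer_instance

-- ===== CLAIM =====
def Claim_equal_split_rows : Prop := ∀ (row : List String), Dom_split_rows row → Spec_split_rows row (split_rows row)

-- ===== LEMMAS AND PROOFS =====

-- getD on a right-padded list agrees with getD on the original (the pad IS the default)
lemma getD_pad (s : List String) (k j : Nat) :
    (s ++ List.replicate k "").getD j "" = s.getD j "" := by
  simp only [List.getD_eq_getElem?_getD, List.getElem?_append, List.getElem?_replicate]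
  split_ifs <;> simp_all

-- zip(*) on a nonempty family of equal-length lists is the index transpose
lemma pyZipStar_const_len (n : Nat) : ∀ (L : List (List String)), L ≠ [] →
    (∀ l ∈ L, l.length = n) →
    pyZipStar L = (List.range n).map (fun j => L.map (fun s => s.getD j "")) := by
  induction n with
  | zero =>
    intro L hne hlen
    rw [pyZipStar]
    have : ¬ (L ≠ [] ∧ ∀ l ∈ L, l ≠ []) := by
      rintro ⟨-, h2⟩
      obtain ⟨a, ha⟩ := List.exists_mem_of_ne_nil L hne
      exact h2 a ha (List.eq_nil_of_length_eq_zero (hlen a ha))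
    simp [this]
  | succ n ih =>
    intro L hne hlen
    have hnonnil : ∀ l ∈ L, l ≠ [] := by
      intro l hl h
      have := hlen l hl; simp [h] at this
    rw [pyZipStar, dif_pos ⟨hne, hnonnil⟩]
    have htail : pyZipStar (L.map (fun l => l.tail))
        = (List.range n).map (fun j => (L.map (fun l => l.tail)).map (fun s => s.getD j "")) := by
      apply ih
      · simpa using hne
      · intro l hl
        obtain ⟨l', hl', rfl⟩ := List.mem_map.1 hl
        have := hlen l' hl'
        simp [List.length_tail, this]
    rw [htail, List.range_succ_eq_map, List.map_cons, List.map_map]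
    congr 1
    · apply List.map_congr_left
      intro l hl
      obtain ⟨a, t, rfl⟩ := List.exists_cons_of_ne_nil (hnonnil l hl)
      rfl
    · apply List.map_congr_left
      intro j _
      simp only [Function.comp, List.map_map]
      apply List.map_congr_left
      intro l hl
      obtain ⟨a, t, rfl⟩ := List.exists_cons_of_ne_nil (hnonnil l hl)
      simp [List.getD]

-- the head-peeling loop is the index transpose up to the maximum length
lemma peelRows_eq (n : Nat) : ∀ (L : List (List String)),
    (∀ l ∈ L, l.length ≤ n) → (∃ l ∈ L, l.length = n) →
    peelRows L = (List.range n).map (fun j => L.map (fun s => s.getD j "")) := by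
  induction n with
  | zero =>
    intro L hub _
    rw [peelRows]
    have : ¬ ∃ l ∈ L, l ≠ [] := by
      rintro ⟨l, hl, hne⟩
      have := hub l hl
      exact hne (List.eq_nil_of_length_eq_zero (Nat.le_zero.mp this))
    simp [this]
  | succ n ih =>
    intro L hub hex
    obtain ⟨m, hm, hmlen⟩ := hex
    have hmn : m ≠ [] := by rintro rfl; simp at hmlen
    rw [peelRows, dif_pos ⟨m, hm, hmn⟩]
    have htail : peelRows (L.map (fun r => r.tail))
        = (List.range n).map (fun j => (L.map (fun r => r.tail)).map (fun s => s.getD j "")) := by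
      apply ih
      · intro l hl
        obtain ⟨l', hl', rfl⟩ := List.mem_map.1 hl
        have := hub l' hl'
        simp [List.length_tail]; omega
      · exact ⟨m.tail, List.mem_map_of_mem hm, by simp [List.length_tail, hmlen]⟩
    rw [htail, List.range_succ_eq_map, List.map_cons, List.map_map]
    congr 1
    · apply List.map_congr_left
      intro l _
      cases l <;> simp [List.getD]
    · apply List.map_congr_left
      intro j _
      simp only [Function.comp, List.map_map]
      apply List.map_congr_left
      intro l _
      cases l <;> simp [List.getD]

-- ===== VERDICT =====
theorem split_rows_spec : Claim_equal_split_rows := by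
  intro row _
  unfold Spec_split_rows split_rows split_rows_alt
  by_cases hc : row.any (fun val => PySem.Str.isIn "\n" val) = true
  · rw [if_pos hc, if_pos hc]
    have hrowne : row ≠ [] := by rintro rfl; simp at hc
    have hsvne : pvSplitVals row ≠ [] := by simp [pvSplitVals, hrowne]
    obtain ⟨a, ha⟩ := List.exists_mem_of_ne_nil _ hsvne
    have hmax : PySem.List.max? ((pvSplitVals row).map (fun s => s.length)) (fun x => x)
        = some (pvMaxLen (pvSplitVals row)) := by
      cases hm : PySem.List.max? ((pvSplitVals row).map (fun s => s.length)) (fun x => x) with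
      | none => exact absurd ((PySem.List.max?_eq_none_iff _ _).mp hm) (by simp [hsvne])
      | some m => simp [pvMaxLen, hm]
    have hle : ∀ s ∈ pvSplitVals row, s.length ≤ pvMaxLen (pvSplitVals row) := by
      intro s hs
      simpa using PySem.List.max?_isMax hmax s.length (List.mem_map_of_mem hs)
    have hexlen : ∃ l ∈ pvSplitVals row, l.length = pvMaxLen (pvSplitVals row) := by
      have := PySem.List.max?_mem hmax
      obtain ⟨s, hs, hsl⟩ := List.mem_map.1 this
      exact ⟨s, hs, hsl⟩
    have hlen : ∀ l ∈ (pvSplitVals row).map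
        (fun sublist => sublist ++ List.replicate (pvMaxLen (pvSplitVals row) - sublist.length) ""),
        l.length = pvMaxLen (pvSplitVals row) := by
      intro l hl
      obtain ⟨s, hs, rfl⟩ := List.mem_map.1 hl
      have := hle s hs
      simp only [List.length_append, List.length_replicate]
      omega
    rw [pyZipStar_const_len (pvMaxLen (pvSplitVals row)) _ (by simp [hsvne]) hlen,
        peelRows_eq (pvMaxLen (pvSplitVals row)) _ hle hexlen]
    apply List.map_congr_left
    intro j _
    rw [List.map_map]
    apply List.map_congr_left
    intro s _
    exact getD_pad s _ j
  · rw [if_neg hc, if_neg hc]
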